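-- pv_equiv track=rewrite | github.com/migo1311/New_GenomeX | GenomX_Semantic.py | can_convert_between_types
-- ===== SOURCE A (Python) =====
-- def can_convert_between_types(from_type, to_type):
--     """Check if a value can be converted from one type to another"""
--     # Same type - always convertible
--     if from_type == to_type:
--         return True
--
--     # Dose can be converted to quant, but not vice versa (would lose precision)
--     if from_type == 'dose' and to_type == 'quant':
--         return True
--
--     # Special case: integer-like quant (e.g., 5.0) could be converted to dose
--     # But this would need runtime checking, so we don't allow it at compile time
--
--     # Arrays of the same element type can be converted
--     if from_type.startswith('array_') and to_type.startswith('array_'):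
--         from_element_type = from_type[6:]
--         to_element_type = to_type[6:]
--         return can_convert_between_types(from_element_type, to_element_type)
--
--     return False
-- ===== SOURCE B (Python) =====
-- def can_convert_between_types(from_type, to_type):
--     """Check if a value can be converted from one type to another"""
--     # Strip matching 'array_' wrappers iteratively, then decide on the bases.
--     while from_type.startswith('array_') and to_type.startswith('array_'):
--         from_type = from_type[6:]
--         to_type = to_type[6:]
--     return from_type == to_type or (from_type == 'dose' and to_type == 'quant')
-- ===== Notes on version B (the rewrite author's own statement) =====
-- stated objective: simpler
-- what changed: Replaced the recursive case analysis by an iterative loop that first strips all matching 'array_' prefixes from both strings and then decides with a single boolean expression on the remaining base types.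
import Mathlib
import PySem

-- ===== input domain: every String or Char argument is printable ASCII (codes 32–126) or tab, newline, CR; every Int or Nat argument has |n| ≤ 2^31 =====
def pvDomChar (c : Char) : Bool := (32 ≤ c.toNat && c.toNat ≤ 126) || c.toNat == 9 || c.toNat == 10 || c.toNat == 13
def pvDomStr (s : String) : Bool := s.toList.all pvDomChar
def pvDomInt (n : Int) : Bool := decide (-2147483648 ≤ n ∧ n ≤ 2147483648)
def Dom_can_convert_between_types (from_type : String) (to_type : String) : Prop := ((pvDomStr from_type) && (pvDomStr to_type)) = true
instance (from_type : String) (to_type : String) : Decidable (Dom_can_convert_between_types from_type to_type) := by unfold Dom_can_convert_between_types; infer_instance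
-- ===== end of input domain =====

-- B changes the recursion into a strip-all-prefixes loop followed by one base-type test (objective: simpler).

-- ===== PORT A =====
-- A's recursion, on the code-point lists (string equality/startswith/[6:] are exact on lists)
def pvGoA : List Char → List Char → Bool
  | f, t =>
    if f = t then true
    else if f = "dose".toList ∧ t = "quant".toList then true
    else if h : "array_".toList <+: f ∧ "array_".toList <+: t then
      pvGoA (f.drop 6) (t.drop 6)
    else false
termination_by f _ => f.length
decreasing_by
  have h6 : 6 ≤ f.length := by simpa using h.1.length_le
  simp [List.length_drop]; omega

def can_convert_between_types (from_type : String) (to_type : String) : Bool :=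
  pvGoA from_type.toList to_type.toList

-- ===== PORT B =====
-- the while loop: strip matching 'array_' prefixes from both strings
def pvStripB : List Char → List Char → List Char × List Char
  | f, t =>
    if h : "array_".toList <+: f ∧ "array_".toList <+: t then
      pvStripB (f.drop 6) (t.drop 6)
    else (f, t)
termination_by f _ => f.length
decreasing_by
  have h6 : 6 ≤ f.length := by simpa using h.1.length_le
  simp [List.length_drop]; omega

def can_convert_between_types_alt (from_type : String) (to_type : String) : Bool :=
  let p := pvStripB from_type.toList to_type.toList
  decide (p.1 = p.2) || (decide (p.1 = "dose".toList) && decide (p.2 = "quant".toList))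

-- ===== PRECONDITION & SPEC =====
def Spec_can_convert_between_types (from_type : String) (to_type : String) (out : Bool) : Prop := out = can_convert_between_types_alt from_type to_type
instance (from_type : String) (to_type : String) (out : Bool) : Decidable (Spec_can_convert_between_types from_type to_type out) := by unfold Spec_can_convert_between_types; infer_instance

-- ===== CLAIM (what is proved, stated in full; the proofs are below) =====
def Claim_equal_can_convert_between_types : Prop := ∀ (from_type : String) (to_type : String), Dom_can_convert_between_types from_type to_type → Spec_can_convert_between_types from_type to_type (can_convert_between_types from_type to_type)

-- ===== LEMMAS AND PROOFS =====

-- stripping two equal lists keeps them equal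
theorem pvStripB_self : ∀ (f t : List Char), f = t → (pvStripB f t).1 = (pvStripB f t).2 := by
  intro f t
  induction f, t using pvStripB.induct with
  | case1 f t h ih => rintro rfl; rw [pvStripB, dif_pos h]; exact ih rfl
  | case2 f t h => rintro rfl; rw [pvStripB, dif_neg h]

theorem pvGoA_eq (f t : List Char) :
    pvGoA f t =
      ((pvStripB f t).1 == (pvStripB f t).2 ||
       ((pvStripB f t).1 == "dose".toList && (pvStripB f t).2 == "quant".toList)) := by
  induction f, t using pvGoA.induct with
  | case1 t =>
    rw [pvGoA]
    simp [pvStripB_self t t rfl]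
  | case2 f t hne hdq =>
    have hna : ¬ ("array_".toList <+: f ∧ "array_".toList <+: t) := by
      rintro ⟨hp, -⟩
      have := hp.length_le
      simp [hdq.1] at this
    rw [pvGoA, pvStripB, dif_neg hna]
    simp [hne, hdq.1, hdq.2]
  | case3 f t hne hdq harr ih =>
    rw [pvGoA, pvStripB, dif_pos harr, dif_pos harr, if_neg hne, if_neg hdq]
    exact ih
  | case4 f t hne hdq harr =>
    rw [pvGoA, pvStripB, dif_neg harr, dif_neg harr, if_neg hne, if_neg hdq]
    by_cases hd : f = "dose".toList <;> simp_all

-- ===== VERDICT (by name: the statement is the Claim_ definition above) =====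
theorem can_convert_between_types_spec : Claim_equal_can_convert_between_types := by
  intro f t _
  unfold Spec_can_convert_between_types can_convert_between_types can_convert_between_types_alt
  rw [pvGoA_eq]
  simp only [beq_eq_decide]
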